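-- pv_equiv track=rewrite | github.com/igopalakri-chwy/chewy-playback | Final_Pipeline/Agents/Breed_Predictor_Agent/main.py | find_matching_breed_key
-- ===== SOURCE A (Python) =====
-- def find_matching_breed_key(user_input: str, breed_definitions: dict) -> str:
--     """Try to find a matching breed key from user input."""
--     user_input_lower = user_input.lower().strip()
--
--     # First try exact match with breed names
--     for breed_key, breed_info in breed_definitions.items():
--         breed_name = breed_info.get('name', '').lower()
--         if breed_name == user_input_lower:
--             return breed_key
--
--     # Then try partial match
--     for breed_key, breed_info in breed_definitions.items():
--         breed_name = breed_info.get('name', '').lower()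
--         if user_input_lower in breed_name or breed_name in user_input_lower:
--             return breed_key
--
--     # Try matching with breed key format (e.g., "golden retriever" -> "goldenRetriever")
--     formatted_input = ''.join(word.capitalize() for word in user_input_lower.split())
--     formatted_input = formatted_input[0].lower() + formatted_input[1:] if formatted_input else ''
--
--     if formatted_input in breed_definitions:
--         return formatted_input
--
--     return None
-- ===== SOURCE B (Python) =====
-- def find_matching_breed_key(user_input: str, breed_definitions: dict) -> str:
--     """Score-and-select: rank every entry (0 exact, 1 partial, 2 none) in one
--     full scan, keep the first entry with the strictly best rank, then the
--     key-format fallback only if no entry matched at all."""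
--     user_input_lower = user_input.lower().strip()
--     best_rank = 2
--     best_key = None
--     for breed_key, breed_info in breed_definitions.items():
--         breed_name = breed_info.get('name', '').lower()
--         if breed_name == user_input_lower:
--             rank = 0
--         elif user_input_lower in breed_name or breed_name in user_input_lower:
--             rank = 1
--         else:
--             rank = 2
--         if rank < best_rank:
--             best_rank = rank
--             best_key = breed_key
--     if best_key is not None:
--         return best_key
--     formatted_input = ''.join(word.capitalize() for word in user_input_lower.split())
--     formatted_input = formatted_input[0].lower() + formatted_input[1:] if formatted_input else ''
--     if formatted_input in breed_definitions:
--         return formatted_input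
--     return None
-- ===== Notes on version B (the rewrite author's own statement) =====
-- stated objective: alternative
-- what changed: B replaces A's staged early-return scans by a score-and-select algorithm: one full scan ranks each entry (0 exact, 1 partial, 2 none) and keeps the first entry of strictly best rank, falling back to the formatted key only when no entry matched.
import Mathlib
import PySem

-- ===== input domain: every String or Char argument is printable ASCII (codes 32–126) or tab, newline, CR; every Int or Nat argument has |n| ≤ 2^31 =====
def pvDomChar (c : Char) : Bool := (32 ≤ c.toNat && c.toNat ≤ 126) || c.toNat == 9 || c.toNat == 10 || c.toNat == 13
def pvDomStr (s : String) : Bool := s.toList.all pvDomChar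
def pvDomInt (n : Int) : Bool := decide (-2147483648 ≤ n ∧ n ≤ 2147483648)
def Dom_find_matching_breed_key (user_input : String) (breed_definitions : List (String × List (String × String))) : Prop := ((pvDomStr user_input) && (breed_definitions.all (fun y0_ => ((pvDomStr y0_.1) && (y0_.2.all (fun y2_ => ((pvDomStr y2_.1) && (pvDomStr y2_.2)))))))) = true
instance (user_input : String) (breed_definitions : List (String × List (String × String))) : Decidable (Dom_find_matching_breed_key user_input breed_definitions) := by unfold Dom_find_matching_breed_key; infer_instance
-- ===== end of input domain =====

-- B replaces A's staged early-return scans by one score-and-select pass (rank 0/1/2, keep first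
-- strictly best); shared helpers below mirror expressions both Pythons contain verbatim.

-- breed_info.get('name', '').lower()  (same expression in both Pythons)
def pvBreedName (breed_info : List (String × String)) : String :=
  PySem.Str.lower ((PySem.Dict.mk breed_info).getD "name" "")

-- word.capitalize() — exact on the ASCII domain (first char uppercased, rest lowered)
def pvCapitalize (w : String) : String :=
  match w.toList with
  | [] => ""
  | c :: t => String.ofList (PySem.Chars.upper [c] ++ PySem.Chars.lower t)

-- the formatted-key fallback block (identical in both Pythons)
def pvFormatted (uil : String) : String :=
  let f := PySem.Str.join "" ((PySem.Str.split₀ uil).map pvCapitalize)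
  match f.toList with
  | [] => ""
  | c :: t => String.ofList (PySem.Chars.lower [c] ++ t)

-- ===== PORT A =====
-- first loop of A: exact-name match
def pvExactA (uil : String) : List (String × List (String × String)) → Option String
  | [] => none
  | (k, info) :: t => if pvBreedName info = uil then some k else pvExactA uil t

-- second loop of A: partial match
def pvPartialA (uil : String) : List (String × List (String × String)) → Option String
  | [] => none
  | (k, info) :: t =>
    if PySem.Str.isIn uil (pvBreedName info) || PySem.Str.isIn (pvBreedName info) uil
    then some k else pvPartialA uil t

def find_matching_breed_key (user_input : String) (breed_definitions : List (String × List (String × String))) : Option String :=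
  let uil := PySem.Str.strip (PySem.Str.lower user_input)
  match pvExactA uil breed_definitions with
  | some k => some k
  | none =>
    match pvPartialA uil breed_definitions with
    | some k => some k
    | none =>
      let f := pvFormatted uil
      if breed_definitions.any (fun p => p.1 == f) then some f else none

-- ===== PORT B =====
-- the rank of one entry: 0 exact, 1 partial, 2 no match
def pvRank (uil : String) (info : List (String × String)) : Nat :=
  let name := pvBreedName info
  if name = uil then 0
  else if PySem.Str.isIn uil name || PySem.Str.isIn name uil then 1
  else 2

-- B's loop: fold keeping (best_rank, best_key), updated only on strict improvement
def pvBestScan (uil : String) (s : Nat × Option String) :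
    List (String × List (String × String)) → Nat × Option String
  | [] => s
  | (k, info) :: t =>
    pvBestScan uil (if pvRank uil info < s.1 then (pvRank uil info, some k) else s) t

def find_matching_breed_key_alt (user_input : String) (breed_definitions : List (String × List (String × String))) : Option String :=
  let uil := PySem.Str.strip (PySem.Str.lower user_input)
  match (pvBestScan uil (2, none) breed_definitions).2 with
  | some k => some k
  | none =>
    let f := pvFormatted uil
    if breed_definitions.any (fun p => p.1 == f) then some f else none

-- ===== PRECONDITION & SPEC =====
def Spec_find_matching_breed_key (user_input : String) (breed_definitions : List (String × List (String × String))) (out : Option String) : Prop := out = find_matching_breed_key_alt user_input breed_definitions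
instance (user_input : String) (breed_definitions : List (String × List (String × String))) (out : Option String) : Decidable (Spec_find_matching_breed_key user_input breed_definitions out) := by unfold Spec_find_matching_breed_key; infer_instance

-- ===== CLAIM (what is proved, stated in full; the proofs are below) =====
def Claim_equal_find_matching_breed_key : Prop := ∀ (user_input : String) (breed_definitions : List (String × List (String × String))), Dom_find_matching_breed_key user_input breed_definitions → Spec_find_matching_breed_key user_input breed_definitions (find_matching_breed_key user_input breed_definitions)

-- ===== LEMMAS AND PROOFS =====

-- characterisation of B's fold by A's two loops, for any starting state of rank ≤ 2
theorem pvBestScan_char (uil : String) (bd : List (String × List (String × String))) :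
    ∀ s : Nat × Option String, s.1 ≤ 2 → pvBestScan uil s bd =
      match pvExactA uil bd with
      | some k => if 0 < s.1 then (0, some k) else s
      | none =>
        match pvPartialA uil bd with
        | some k => if 1 < s.1 then (1, some k) else s
        | none => s := by
  induction bd with
  | nil => intro s _; simp [pvBestScan, pvExactA, pvPartialA]
  | cons hd t ih =>
    intro s hs
    obtain ⟨k, info⟩ := hd
    obtain ⟨r, ko⟩ := s
    simp only at hs
    simp only [pvBestScan, pvExactA, pvPartialA]
    by_cases he : pvBreedName info = uil
    · have hr : pvRank uil info = 0 := by simp [pvRank, he]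
      rw [hr]
      simp only [if_pos he]
      by_cases h0 : 0 < r
      · rw [if_pos h0, ih (0, some k) (by norm_num)]
        cases pvExactA uil t <;> cases pvPartialA uil t <;> simp
      · have hz : r = 0 := by omega
        subst hz
        rw [if_neg h0, ih (0, ko) (by norm_num)]
        cases pvExactA uil t <;> cases pvPartialA uil t <;> simp
    · by_cases hp : (PySem.Str.isIn uil (pvBreedName info) || PySem.Str.isIn (pvBreedName info) uil) = true
      · have hr : pvRank uil info = 1 := by simp only [pvRank]; rw [if_neg he, if_pos hp]
        rw [hr]
        simp only [if_neg he, hp, if_true]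
        by_cases h1 : 1 < r
        · rw [if_pos h1, ih (1, some k) (by norm_num)]
          cases pvExactA uil t <;> cases pvPartialA uil t <;>
            simp [if_pos (by omega : 0 < r)]
        · rw [if_neg h1, ih (r, ko) hs]
          simp only [if_neg h1]
          cases pvExactA uil t <;> cases pvPartialA uil t <;> simp
      · have hr : pvRank uil info = 2 := by simp only [pvRank]; rw [if_neg he, if_neg hp]
        rw [hr]
        simp only [if_neg he, hp, Bool.false_eq_true, if_false]
        rw [if_neg (by omega : ¬ 2 < r), ih (r, ko) hs]

-- ===== VERDICT (by name: the statement is the Claim_ definition above) =====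
theorem find_matching_breed_key_spec : Claim_equal_find_matching_breed_key := by
  intro user_input bd _
  have h := pvBestScan_char (PySem.Str.strip (PySem.Str.lower user_input)) bd (2, none) (by norm_num)
  unfold Spec_find_matching_breed_key find_matching_breed_key find_matching_breed_key_alt
  simp only [h]
  cases pvExactA (PySem.Str.strip (PySem.Str.lower user_input)) bd <;>
    cases pvPartialA (PySem.Str.strip (PySem.Str.lower user_input)) bd <;> simp
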